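-- pv_equiv track=rewrite | github.com/TimothySamson/bioinformatics_v2 | course3/week3/space_efficient.py | last_column
-- ===== SOURCE A (Python) =====
-- def last_column(v, w, match, mismatch, indel):
--     mismatch = -mismatch
--     indel = -indel
--
--     m = len(v)
--     n = len(w)
--
--     # setup first column
--     prev = [i * indel for i in range(m+1)]
--
--     for j in range(1, n+1):
--         next = [indel * j]
--
--         if j == n:
--             backtrack = ["right"]
--         for i in range(1, m+1):
--             diag_edge = prev[i-1] + (match if v[i-1] == w[j-1] else mismatch)
--             right_edge = prev[i] + indel
--             down_edge = next[-1] + indel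
--
--             # backtrack pointers (only for the last column tho, and only when going in reverse)
--             if j == n:
--                 max_node = max(diag_edge, right_edge, down_edge)
--                 if max_node == diag_edge:
--                     backtrack.append("diag")
--                 elif max_node == right_edge:
--                     backtrack.append("right")
--                 elif max_node == down_edge:
--                     backtrack.append("down")
--
--             next.append(max(diag_edge, right_edge, down_edge))
--
--         prev = next
--
--     return prev, backtrack
-- ===== SOURCE B (Python) =====
-- def last_column(v, w, match, mismatch, indel):
--     mismatch = -mismatch
--     indel = -indel
--     m = len(v)
--     n = len(w)
--     # Transposed traversal: fill the DP table ROW by ROW (over v), keeping one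
--     # row of length n+1 and collecting only the last two entries of each row.
--     row = [j * indel for j in range(n + 1)]
--     lastcol = [row[-1]]
--     penult = [row[-2]] if n >= 1 else []
--     for i in range(1, m + 1):
--         new = [i * indel]
--         for j in range(1, n + 1):
--             s = match if v[i - 1] == w[j - 1] else mismatch
--             new.append(max(row[j - 1] + s, new[-1] + indel, row[j] + indel))
--         row = new
--         lastcol.append(row[-1])
--         if n >= 1:
--             penult.append(row[-2])
--     if n == 0:
--         return lastcol, []
--     # Separate pass: rebuild the last-column backtrack from the two kept columns.
--     wn = w[-1]
--     backtrack = ["right"]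
--     for i in range(1, m + 1):
--         diag = penult[i - 1] + (match if v[i - 1] == wn else mismatch)
--         right = penult[i] + indel
--         down = lastcol[i - 1] + indel
--         best = max(diag, right, down)
--         if best == diag:
--             backtrack.append("diag")
--         elif best == right:
--             backtrack.append("right")
--         else:
--             backtrack.append("down")
--     return lastcol, backtrack
-- ===== Notes on version B (the rewrite author's own statement) =====
-- stated objective: alternative
-- what changed: B fills the DP table in the transposed order - row by row over v keeping a single row of length n+1 (A goes column by column over w keeping columns of length m+1) - collects only the last two entries of each row, and reconstructs the last-column backtrack in a separate pass from those two kept columns; A records the backtrack inline while filling its last column.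
-- crash fix: On w == '' A raises UnboundLocalError (its local 'backtrack' is never assigned); B returns the first DP column paired with an empty backtrack list. — e.g. on last_column("a", "", 1, 1, 1): A raises UnboundLocalError, B returns ([0, -1], [])
import Mathlib
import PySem

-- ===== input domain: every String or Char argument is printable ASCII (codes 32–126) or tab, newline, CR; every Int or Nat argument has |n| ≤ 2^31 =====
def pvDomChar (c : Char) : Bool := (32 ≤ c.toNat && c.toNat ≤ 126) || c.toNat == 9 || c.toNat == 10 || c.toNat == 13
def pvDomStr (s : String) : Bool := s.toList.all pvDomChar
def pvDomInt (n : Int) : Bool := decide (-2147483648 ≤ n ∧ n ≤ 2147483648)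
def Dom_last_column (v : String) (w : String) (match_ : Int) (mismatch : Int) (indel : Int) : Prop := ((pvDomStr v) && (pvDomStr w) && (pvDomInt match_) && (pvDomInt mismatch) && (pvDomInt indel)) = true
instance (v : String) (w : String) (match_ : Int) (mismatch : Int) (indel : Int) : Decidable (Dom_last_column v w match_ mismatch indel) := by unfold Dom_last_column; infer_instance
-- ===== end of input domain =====

-- B fills the DP table in the TRANSPOSED order (row by row over v, one row of length n+1 kept,
-- collecting only each row's last two entries) and rebuilds the last-column backtrack in a
-- separate pass; A goes column by column over w with inline backtrack recording.
-- Objective: alternative decomposition, same asymptotic cost. Return-value equivalence only.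

-- ===== PORT A =====
-- inner loop over i = 1..m: consumes v's chars, slides over prev, carries next[-1];
-- returns (tail of next, backtrack entries appended when j == n i.e. last = true)
def lcA_loop (mtch mm ind : Int) (wj : Char) (last : Bool) :
    List Char → List Int → Int → List Int × List String
  | [], _, _ => ([], [])
  | c :: cs, p0 :: p1 :: ps, cur =>
      let diag := p0 + (if c = wj then mtch else mm)
      let right := p1 + ind
      let down := cur + ind
      let mx := max (max diag right) down
      let tag := if mx = diag then "diag" else if mx = right then "right" else "down"
      let r := lcA_loop mtch mm ind wj last cs (p1 :: ps) mx
      (mx :: r.1, if last then tag :: r.2 else r.2)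
  | _ :: _, _, _ => ([], [])   -- unreachable: prev always has length m+1

-- outer loop over j = 1..n; on the last column prepends "right" to the backtrack
def lcA_cols (mtch mm ind : Int) (vc : List Char) :
    Int → List Char → List Int → List Int × List String
  | _, [], prev => (prev, [])
  | j, wj :: rest, prev =>
      let last := rest.isEmpty
      let r := lcA_loop mtch mm ind wj last vc prev (ind * j)
      let next := ind * j :: r.1
      if last then (next, "right" :: r.2) else lcA_cols mtch mm ind vc (j + 1) rest next

def last_column (v : String) (w : String) (match_ : Int) (mismatch : Int) (indel : Int) :
    List Int × List String :=
  let mm := -mismatch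
  let ind := -indel
  let vc := v.toList
  let prev := (List.range (vc.length + 1)).map (fun i : Nat => (i : Int) * ind)
  lcA_cols match_ mm ind vc 1 w.toList prev

-- ===== PORT B =====
-- inner loop over j = 1..n: DP values of one row, sliding over the previous row
def lcB_row (mtch mm ind : Int) (vi : Char) :
    List Char → List Int → Int → List Int
  | [], _, _ => []
  | c :: cs, p0 :: p1 :: ps, cur =>
      let s := if vi = c then mtch else mm
      let mx := max (max (p0 + s) (cur + ind)) (p1 + ind)
      mx :: lcB_row mtch mm ind vi cs (p1 :: ps) mx
  | _ :: _, _, _ => []   -- unreachable: row always has length n+1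

-- lastD/pen2D port Python's row[-1]/row[-2]; exact whenever the list has ≥1/≥2
-- elements, which holds for every DP row used (length n+1; pen2D only used when n ≥ 1)
def lastD : List Int → Int
  | [] => 0
  | [x] => x
  | _ :: x :: xs => lastD (x :: xs)

def pen2D : List Int → Int
  | [] => 0
  | [_] => 0
  | [x, _] => x
  | _ :: x :: y :: xs => pen2D (x :: y :: xs)

-- outer loop over i = 1..m: builds each row from the previous one and collects
-- (row[-1], row[-2]) of every row — the final column and the second-to-last column
def lcB_rows (mtch mm ind : Int) (wc : List Char) :
    List Char → Int → List Int → List Int × List Int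
  | [], _, _ => ([], [])
  | c :: cs, i, row =>
      let new := ind * i :: lcB_row mtch mm ind c wc row (ind * i)
      let r := lcB_rows mtch mm ind wc cs (i + 1) new
      (lastD new :: r.1, if wc.isEmpty then r.2 else pen2D new :: r.2)

-- separate backtrack-reconstruction pass: penult slides, lastcol slides with head lastcol[i-1]
def lcB_bt (mtch mm ind : Int) (wn : Char) :
    List Char → List Int → List Int → List String
  | c :: cs, p0 :: p1 :: ps, f0 :: fs =>
      let diag := p0 + (if c = wn then mtch else mm)
      let right := p1 + ind
      let down := f0 + ind
      let best := max (max diag right) down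
      (if best = diag then "diag" else if best = right then "right" else "down") ::
        lcB_bt mtch mm ind wn cs (p1 :: ps) fs
  | _, _, _ => []

def last_column_alt (v : String) (w : String) (match_ : Int) (mismatch : Int) (indel : Int) :
    List Int × List String :=
  let mm := -mismatch
  let ind := -indel
  let vc := v.toList
  let wc := w.toList
  let row0 := (List.range (wc.length + 1)).map (fun j : Nat => (j : Int) * ind)
  let r := lcB_rows match_ mm ind wc vc 1 row0
  let lastcol := lastD row0 :: r.1
  if wc.isEmpty then (lastcol, [])
  else
    (lastcol, "right" :: lcB_bt match_ mm ind (wc.getLastD ' ') vc (pen2D row0 :: r.2) lastcol)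

-- ===== PRECONDITION & SPEC =====
-- Pre_ excludes exactly w = "": there A's local `backtrack` is never assigned and A raises UnboundLocalError.
def Pre_last_column (v : String) (w : String) (match_ : Int) (mismatch : Int) (indel : Int) : Prop :=
  w ≠ ""
instance (v : String) (w : String) (match_ : Int) (mismatch : Int) (indel : Int) :
    Decidable (Pre_last_column v w match_ mismatch indel) := by unfold Pre_last_column; infer_instance
def pvWitness_last_column : String × String × Int × Int × Int := ("ab", "ba", 1, 1, 2)

-- On w = "" A raises UnboundLocalError (`backtrack` never assigned); B returns the first DP column with an empty backtrack list.
def Raises_last_column (v : String) (w : String) (match_ : Int) (mismatch : Int) (indel : Int) : Prop :=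
  w = ""
instance (v : String) (w : String) (match_ : Int) (mismatch : Int) (indel : Int) :
    Decidable (Raises_last_column v w match_ mismatch indel) := by unfold Raises_last_column; infer_instance
def pvRaiseWitness_last_column : String × String × Int × Int × Int := ("a", "", 1, 1, 1)
def pvRaiseWitnessOut_last_column : List Int × List String := ([0, -1], [])

def Spec_last_column (v : String) (w : String) (match_ : Int) (mismatch : Int) (indel : Int) (out : List Int × List String) : Prop := out = last_column_alt v w match_ mismatch indel
instance (v : String) (w : String) (match_ : Int) (mismatch : Int) (indel : Int) (out : List Int × List String) : Decidable (Spec_last_column v w match_ mismatch indel out) := by unfold Spec_last_column; infer_instance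

-- ===== CLAIM (what is proved, stated in full; the proofs are below) =====
def Claim_equal_last_column : Prop := ∀ (v : String) (w : String) (match_ : Int) (mismatch : Int) (indel : Int), Dom_last_column v w match_ mismatch indel → Pre_last_column v w match_ mismatch indel → Spec_last_column v w match_ mismatch indel (last_column v w match_ mismatch indel)
def Claim_raises_last_column : Prop := (∀ (v : String) (w : String) (match_ : Int) (mismatch : Int) (indel : Int), Dom_last_column v w match_ mismatch indel → Raises_last_column v w match_ mismatch indel → ¬ Pre_last_column v w match_ mismatch indel) ∧ (Dom_last_column (pvRaiseWitness_last_column.1) (pvRaiseWitness_last_column.2.1) (pvRaiseWitness_last_column.2.2.1) (pvRaiseWitness_last_column.2.2.2.1) (pvRaiseWitness_last_column.2.2.2.2) ∧ Raises_last_column (pvRaiseWitness_last_column.1) (pvRaiseWitness_last_column.2.1) (pvRaiseWitness_last_column.2.2.1) (pvRaiseWitness_last_column.2.2.2.1) (pvRaiseWitness_last_column.2.2.2.2) ∧ last_column_alt (pvRaiseWitness_last_column.1) (pvRaiseWitness_last_column.2.1) (pvRaiseWitness_last_column.2.2.1) (pvRaiseWitness_last_column.2.2.2.1) (pvRaiseWitness_last_column.2.2.2.2)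 = pvRaiseWitnessOut_last_column)

-- ===== LEMMAS AND PROOFS =====

-- the common specification: the alignment DP table, cell (i, j)
def dp (vc wc : List Char) (mtch mm ind : Int) : Nat → Nat → Int
  | 0, j => (j : Int) * ind
  | (i+1), 0 => ((i+1 : Nat) : Int) * ind
  | (i+1), (j+1) =>
      let s := if vc.getD i ' ' = wc.getD j ' ' then mtch else mm
      max (max (dp vc wc mtch mm ind i j + s) (dp vc wc mtch mm ind (i+1) j + ind))
          (dp vc wc mtch mm ind i (j+1) + ind)
termination_by i j => i + j

def colA (vc wc : List Char) (mtch mm ind : Int) (j : Nat) : List Int :=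
  (List.range (vc.length + 1)).map (fun i => dp vc wc mtch mm ind i j)

def rowB (vc wc : List Char) (mtch mm ind : Int) (i : Nat) : List Int :=
  (List.range (wc.length + 1)).map (fun j => dp vc wc mtch mm ind i j)

theorem dp_col_zero (vc wc : List Char) (mtch mm ind : Int) (i : Nat) :
    dp vc wc mtch mm ind i 0 = (i : Int) * ind := by
  cases i <;> simp [dp]

theorem dp_row_zero (vc wc : List Char) (mtch mm ind : Int) (j : Nat) :
    dp vc wc mtch mm ind 0 j = (j : Int) * ind := by
  simp [dp]

theorem rangeMap_drop (f : Nat → Int) (N k : Nat) (hk : k < N) :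
    ((List.range N).map f).drop k = f k :: ((List.range N).map f).drop (k + 1) := by
  have hlen : k < ((List.range N).map f).length := by simpa using hk
  rw [List.drop_eq_getElem_cons hlen]
  simp

theorem cons_map_range (g : Nat → Int) (x : Int) (d : Nat) (hx : x = g 0) :
    x :: (List.range d).map (fun t => g (t + 1)) = (List.range (d + 1)).map g := by
  rw [List.range_succ_eq_map, List.map_cons, List.map_map, hx]; rfl

theorem lastD_append (l : List Int) (x : Int) : lastD (l ++ [x]) = x := by
  induction l with
  | nil => rfl
  | cons a l ih =>
      cases l with
      | nil => rfl
      | cons b l' => simpa [lastD] using ih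

theorem pen2D_append (l : List Int) (x y : Int) : pen2D (l ++ [x, y]) = x := by
  induction l with
  | nil => rfl
  | cons a l ih =>
      cases l with
      | nil => rfl
      | cons b l' =>
          rcases hl : l' ++ [x, y] with _ | ⟨c, r⟩
          · simp at hl
          · simpa [pen2D, hl] using by simpa [hl] using ih

theorem lastD_rangeMap (f : Nat → Int) (N : Nat) :
    lastD ((List.range (N + 1)).map f) = f N := by
  rw [List.range_succ, List.map_append]
  simpa using lastD_append ((List.range N).map f) (f N)

theorem pen2D_rangeMap (f : Nat → Int) (N : Nat) :
    pen2D ((List.range (N + 2)).map f) = f N := by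
  rw [show N + 2 = (N + 1) + 1 from rfl, List.range_succ, List.range_succ,
    List.map_append, List.map_append, List.append_assoc]
  simpa using pen2D_append ((List.range N).map f) (f N) (f (N + 1))

-- A's inner loop computes column j+1 of the DP table from column j
theorem lcA_loop_fst_dp (vc wc : List Char) (mtch mm ind : Int) (last : Bool) (j : Nat) :
    ∀ (d k : Nat), k + d = vc.length →
      (lcA_loop mtch mm ind (wc.getD j ' ') last (vc.drop k)
          ((colA vc wc mtch mm ind j).drop k) (dp vc wc mtch mm ind k (j + 1))).1
        = (colA vc wc mtch mm ind (j + 1)).drop (k + 1) := by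
  intro d
  induction d with
  | zero =>
      intro k hk
      have h1 : vc.drop k = [] := List.drop_eq_nil_of_le (by omega)
      have h2 : (colA vc wc mtch mm ind (j + 1)).drop (k + 1) = [] := by
        apply List.drop_eq_nil_of_le
        simp [colA]; omega
      rw [h1, h2, lcA_loop]
  | succ d ih =>
      intro k hk
      have hkm : k < vc.length := by omega
      have hv : vc.drop k = vc.getD k ' ' :: vc.drop (k + 1) := by
        rw [List.drop_eq_getElem_cons hkm, List.getD_eq_getElem vc ' ' hkm]
      have hc : (colA vc wc mtch mm ind j).drop k
          = dp vc wc mtch mm ind k j :: (colA vc wc mtch mm ind j).drop (k + 1) :=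
        rangeMap_drop _ _ k (by omega)
      have hc2 : (colA vc wc mtch mm ind j).drop (k + 1)
          = dp vc wc mtch mm ind (k + 1) j :: (colA vc wc mtch mm ind j).drop (k + 2) :=
        rangeMap_drop _ _ (k + 1) (by omega)
      have hmx : max (max (dp vc wc mtch mm ind k j +
            (if vc.getD k ' ' = wc.getD j ' ' then mtch else mm))
            (dp vc wc mtch mm ind (k + 1) j + ind)) (dp vc wc mtch mm ind k (j + 1) + ind)
          = dp vc wc mtch mm ind (k + 1) (j + 1) := by
        conv_rhs => rw [dp]
      rw [hv, hc, hc2, lcA_loop]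
      simp only [hmx]
      rw [show (colA vc wc mtch mm ind (j + 1)).drop (k + 1)
            = dp vc wc mtch mm ind (k + 1) (j + 1) :: (colA vc wc mtch mm ind (j + 1)).drop (k + 2)
          from rangeMap_drop _ _ (k + 1) (by omega)]
      have := ih (k + 1) (by omega)
      rw [hc2] at this
      simpa using this

-- on the final column, A's inline backtrack entries equal B's reconstruction pass
theorem lcA_loop_snd (mtch mm ind : Int) (wj : Char) :
    ∀ (vcs : List Char) (prev : List Int) (cur : Int),
      (lcA_loop mtch mm ind wj true vcs prev cur).2
        = lcB_bt mtch mm ind wj vcs prev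
            (cur :: (lcA_loop mtch mm ind wj true vcs prev cur).1) := by
  intro vcs
  induction vcs with
  | nil => intro prev cur; cases prev <;> simp [lcA_loop, lcB_bt]
  | cons c cs ih =>
      intro prev cur
      match prev with
      | [] => simp [lcA_loop, lcB_bt]
      | [p0] => simp [lcA_loop, lcB_bt]
      | p0 :: p1 :: ps => simp [lcA_loop, lcB_bt, ih]

-- A's outer loop, started at column j with that column's DP values, yields the final
-- DP column together with the backtrack rebuilt from the last two columns
theorem lcA_cols_dp (vc wc : List Char) (mtch mm ind : Int) :
    ∀ (suffw : List Char) (j : Nat), wc.drop j = suffw → suffw ≠ [] →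
      lcA_cols mtch mm ind vc ((j : Int) + 1) suffw (colA vc wc mtch mm ind j)
        = (colA vc wc mtch mm ind wc.length,
           "right" :: lcB_bt mtch mm ind (wc.getD (wc.length - 1) ' ') vc
             (colA vc wc mtch mm ind (wc.length - 1)) (colA vc wc mtch mm ind wc.length)) := by
  intro suffw
  induction suffw with
  | nil => intro j _ h; exact absurd rfl h
  | cons wj rest ih =>
      intro j hdrop _
      have hj : j < wc.length := by
        by_contra h
        rw [List.drop_eq_nil_of_le (by omega)] at hdrop
        exact (List.cons_ne_nil _ _) hdrop.symm
      have hget := List.drop_eq_getElem_cons hj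
      rw [hdrop] at hget
      obtain ⟨h1g, h2g⟩ := List.cons_eq_cons.mp hget
      have hwj : wj = wc.getD j ' ' := by rw [List.getD_eq_getElem wc ' ' hj]; exact h1g
      have hrest : wc.drop (j + 1) = rest := h2g.symm
      have hcur : ind * ((j : Int) + 1) = dp vc wc mtch mm ind 0 (j + 1) := by
        rw [dp_row_zero]; push_cast; ring
      have hcons : colA vc wc mtch mm ind (j + 1)
          = dp vc wc mtch mm ind 0 (j + 1) :: (colA vc wc mtch mm ind (j + 1)).drop 1 := by
        simpa [colA] using
          rangeMap_drop (fun i => dp vc wc mtch mm ind i (j + 1)) (vc.length + 1) 0 (by omega)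
      cases rest with
      | nil =>
          have hlen := congrArg List.length hrest
          simp at hlen
          have hn : wc.length = j + 1 := by omega
          have hfst := lcA_loop_fst_dp vc wc mtch mm ind true j vc.length 0 (by omega)
          simp only [List.drop_zero] at hfst
          have hsnd := lcA_loop_snd mtch mm ind (wc.getD j ' ') vc
            (colA vc wc mtch mm ind j) (dp vc wc mtch mm ind 0 (j + 1))
          simp only [lcA_cols, List.isEmpty_nil, if_true]
          rw [hwj, hcur, hsnd, hfst, ← hcons, hn]
          simp
      | cons a as =>
          have hfst := lcA_loop_fst_dp vc wc mtch mm ind false j vc.length 0 (by omega)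
          simp only [List.drop_zero] at hfst
          simp only [lcA_cols, List.isEmpty_cons, Bool.false_eq_true, if_false]
          rw [hwj, hcur, hfst, ← hcons]
          have hih := ih (j + 1) hrest (by simp)
          rw [show ((j : Int) + 1) + 1 = (((j + 1 : Nat) : Int) + 1) by push_cast; ring]
          exact hih

-- B's inner loop computes row i+1 of the DP table from row i
theorem lcB_row_dp (vc wc : List Char) (mtch mm ind : Int) (i : Nat) :
    ∀ (d k : Nat), k + d = wc.length →
      lcB_row mtch mm ind (vc.getD i ' ') (wc.drop k)
          ((rowB vc wc mtch mm ind i).drop k) (dp vc wc mtch mm ind (i + 1) k)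
        = (rowB vc wc mtch mm ind (i + 1)).drop (k + 1) := by
  intro d
  induction d with
  | zero =>
      intro k hk
      have h1 : wc.drop k = [] := List.drop_eq_nil_of_le (by omega)
      have h2 : (rowB vc wc mtch mm ind (i + 1)).drop (k + 1) = [] := by
        apply List.drop_eq_nil_of_le
        simp [rowB]; omega
      rw [h1, h2, lcB_row]
  | succ d ih =>
      intro k hk
      have hkn : k < wc.length := by omega
      have hw : wc.drop k = wc.getD k ' ' :: wc.drop (k + 1) := by
        rw [List.drop_eq_getElem_cons hkn, List.getD_eq_getElem wc ' ' hkn]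
      have hr : (rowB vc wc mtch mm ind i).drop k
          = dp vc wc mtch mm ind i k :: (rowB vc wc mtch mm ind i).drop (k + 1) :=
        rangeMap_drop _ _ k (by simp [rowB]; omega)
      have hr2 : (rowB vc wc mtch mm ind i).drop (k + 1)
          = dp vc wc mtch mm ind i (k + 1) :: (rowB vc wc mtch mm ind i).drop (k + 2) :=
        rangeMap_drop _ _ (k + 1) (by simp [rowB]; omega)
      have hmx : max (max (dp vc wc mtch mm ind i k +
            (if vc.getD i ' ' = wc.getD k ' ' then mtch else mm))
            (dp vc wc mtch mm ind (i + 1) k + ind)) (dp vc wc mtch mm ind i (k + 1) + ind)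
          = dp vc wc mtch mm ind (i + 1) (k + 1) := by
        conv_rhs => rw [dp]
      rw [hw, hr, hr2, lcB_row]
      simp only [hmx]
      rw [show (rowB vc wc mtch mm ind (i + 1)).drop (k + 1)
            = dp vc wc mtch mm ind (i + 1) (k + 1) :: (rowB vc wc mtch mm ind (i + 1)).drop (k + 2)
          from rangeMap_drop _ _ (k + 1) (by simp [rowB]; omega)]
      have := ih (k + 1) (by omega)
      rw [hr2] at this
      simpa using this

-- B's outer loop collects exactly (dp · n, dp · (n-1)) for the remaining rows
theorem lcB_rows_dp (vc wc : List Char) (mtch mm ind : Int) (hw : wc ≠ []) :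
    ∀ (d i : Nat), i + d = vc.length →
      lcB_rows mtch mm ind wc (vc.drop i) ((i : Int) + 1) (rowB vc wc mtch mm ind i)
        = ((List.range d).map (fun t => dp vc wc mtch mm ind (i + 1 + t) wc.length),
           (List.range d).map (fun t => dp vc wc mtch mm ind (i + 1 + t) (wc.length - 1))) := by
  intro d
  induction d with
  | zero =>
      intro i hi
      have h1 : vc.drop i = [] := List.drop_eq_nil_of_le (by omega)
      rw [h1, lcB_rows]
      simp
  | succ d ih =>
      intro i hi
      have him : i < vc.length := by omega
      have hv : vc.drop i = vc.getD i ' ' :: vc.drop (i + 1) := by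
        rw [List.drop_eq_getElem_cons him, List.getD_eq_getElem vc ' ' him]
      obtain ⟨n', hn'⟩ : ∃ n', wc.length = n' + 1 := by
        cases wc with
        | nil => exact absurd rfl hw
        | cons a l => exact ⟨l.length, rfl⟩
      have hcur : ind * ((i : Int) + 1) = dp vc wc mtch mm ind (i + 1) 0 := by
        rw [dp_col_zero]; push_cast; ring
      have hrow := lcB_row_dp vc wc mtch mm ind i wc.length 0 (by omega)
      simp only [List.drop_zero] at hrow
      have hfold : rowB vc wc mtch mm ind (i + 1)
          = dp vc wc mtch mm ind (i + 1) 0 :: (rowB vc wc mtch mm ind (i + 1)).drop 1 := by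
        simpa [rowB] using
          rangeMap_drop (fun j => dp vc wc mtch mm ind (i + 1) j) (wc.length + 1) 0 (by omega)
      have hnew : (ind * ((i : Int) + 1)
            :: lcB_row mtch mm ind (vc.getD i ' ') wc (rowB vc wc mtch mm ind i)
                (ind * ((i : Int) + 1)))
          = rowB vc wc mtch mm ind (i + 1) := by
        rw [hcur, hrow]; exact hfold.symm
      have hemp : wc.isEmpty = false := by
        cases wc with
        | nil => exact absurd rfl hw
        | cons a l => rfl
      rw [hv]
      simp only [lcB_rows, hemp, Bool.false_eq_true, if_false]
      rw [hnew]
      have hlast : lastD (rowB vc wc mtch mm ind (i + 1))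
          = dp vc wc mtch mm ind (i + 1) wc.length := by
        unfold rowB
        exact lastD_rangeMap _ _
      have hpen : pen2D (rowB vc wc mtch mm ind (i + 1))
          = dp vc wc mtch mm ind (i + 1) (wc.length - 1) := by
        unfold rowB
        rw [hn', show n' + 1 + 1 = n' + 2 from rfl]
        simpa [hn'] using pen2D_rangeMap (fun j => dp vc wc mtch mm ind (i + 1) j) n'
      have hrec := ih (i + 1) (by omega)
      rw [show ((i : Int) + 1) + 1 = (((i + 1 : Nat) : Int) + 1) by push_cast; ring]
      rw [hrec, hlast, hpen]
      have hsh : ∀ t, i + 1 + 1 + t = i + 1 + (t + 1) := fun t => by omega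
      simp only [Prod.mk.injEq, hsh]
      constructor
      · exact cons_map_range (fun t => dp vc wc mtch mm ind (i + 1 + t) wc.length) _ d rfl
      · exact cons_map_range (fun t => dp vc wc mtch mm ind (i + 1 + t) (wc.length - 1)) _ d rfl

theorem toList_ne_nil_of_ne_empty {w : String} (h : w ≠ "") : w.toList ≠ [] := by
  intro hnil
  apply h
  have : w.toList = ("" : String).toList := by simpa using hnil
  exact String.toList_injective this

theorem getLastD_eq_getD {wc : List Char} (h : wc ≠ []) :
    wc.getLastD ' ' = wc.getD (wc.length - 1) ' ' := by
  have hlen : 0 < wc.length := List.length_pos_of_ne_nil h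
  have h1 : wc.length - 1 < wc.length := by omega
  rw [List.getLastD_eq_getLast?, List.getLast?_eq_getElem?, List.getElem?_eq_getElem h1,
    List.getD_eq_getElem wc ' ' h1]
  rfl

-- ===== VERDICT (by name: the statement is the Claim_ definition above) =====
theorem last_column_spec : Claim_equal_last_column := by
  intro v w match_ mismatch indel _ hpre
  simp only [Spec_last_column, last_column, last_column_alt]
  have hw : w.toList ≠ [] := toList_ne_nil_of_ne_empty hpre
  set vc := v.toList with hvc
  set wc := w.toList with hwc
  set mm := -mismatch
  set ind := -indel
  obtain ⟨n', hn'⟩ : ∃ n', wc.length = n' + 1 := by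
    cases h : wc with
    | nil => exact absurd h hw
    | cons a l => exact ⟨l.length, by simp [h]⟩
  -- initial column / initial row are dp's boundary
  have hcol0 : (List.range (vc.length + 1)).map (fun i : Nat => (i : Int) * ind)
      = colA vc wc match_ mm ind 0 := by
    unfold colA
    apply List.map_congr_left
    intro i _
    rw [dp_col_zero]
  have hrow0 : (List.range (wc.length + 1)).map (fun j : Nat => (j : Int) * ind)
      = rowB vc wc match_ mm ind 0 := by
    unfold rowB
    apply List.map_congr_left
    intro j _
    rw [dp]
  -- A's side
  have hA := lcA_cols_dp vc wc match_ mm ind wc 0 (by simp) hw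
  simp only [Nat.cast_zero, zero_add] at hA
  -- B's side
  have hB := lcB_rows_dp vc wc match_ mm ind hw vc.length 0 (by omega)
  simp only [Nat.cast_zero, zero_add, List.drop_zero] at hB
  have hlast0 : lastD (rowB vc wc match_ mm ind 0) = dp vc wc match_ mm ind 0 wc.length := by
    unfold rowB; exact lastD_rangeMap _ _
  have hpen0 : pen2D (rowB vc wc match_ mm ind 0) = dp vc wc match_ mm ind 0 (wc.length - 1) := by
    unfold rowB
    rw [hn', show n' + 1 + 1 = n' + 2 from rfl]
    simpa using pen2D_rangeMap (fun j => dp vc wc match_ mm ind 0 j) n'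
  have hlcol : dp vc wc match_ mm ind 0 wc.length
        :: (List.range vc.length).map (fun t => dp vc wc match_ mm ind (0 + 1 + t) wc.length)
      = colA vc wc match_ mm ind wc.length := by
    unfold colA
    have hsh : ∀ t : Nat, 0 + 1 + t = t + 1 := fun t => by omega
    simp only [hsh]
    exact cons_map_range (fun t => dp vc wc match_ mm ind t wc.length) _ vc.length rfl
  have hpcol : dp vc wc match_ mm ind 0 (wc.length - 1)
        :: (List.range vc.length).map (fun t => dp vc wc match_ mm ind (0 + 1 + t) (wc.length - 1))
      = colA vc wc match_ mm ind (wc.length - 1) := by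
    unfold colA
    have hsh : ∀ t : Nat, 0 + 1 + t = t + 1 := fun t => by omega
    simp only [hsh]
    exact cons_map_range (fun t => dp vc wc match_ mm ind t (wc.length - 1)) _ vc.length rfl
  have hemp : wc.isEmpty = false := by
    cases hc : wc with
    | nil => exact absurd hc hw
    | cons a l => rfl
  rw [hcol0, hrow0, hA, hB]
  simp only [hemp, Bool.false_eq_true, if_false, hlast0, hpen0, getLastD_eq_getD hw]
  rw [hlcol, hpcol]

@[simp] theorem last_column_raises : Claim_raises_last_column := by
  unfold Claim_raises_last_column
  exact ⟨fun v w a b c _ hr hp => hp hr, by decide⟩
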